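-- pv_equiv track=rewrite | github.com/pavelgolikov/Python-Code | Old/Recursion practice easy and harder.py | paren_bit
-- ===== SOURCE A (Python) =====
-- def paren_bit(s, flag = False):
--    if len(s) == 0:
--        return ''
--    else:
--        if s[0] == '(':
--            return s[0] + paren_bit(s[1:], True)
--        elif s[0] == ')':
--            return s[0] + paren_bit(s[1:])
--        else:
--            if flag == True:
--                return s[0] + paren_bit(s[1:], True)
--            else:
--                return paren_bit(s[1:])
-- ===== SOURCE B (Python) =====
-- def paren_bit(s, flag = False):
--     # Split on ')' once; every ')' is kept by re-joining. Within each part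
--     # (which contains no ')'), everything from the first '(' onward is kept;
--     # the first part is kept whole when we start inside a region (flag=True).
--     parts = s.split(')')
--     keep = []
--     for i, p in enumerate(parts):
--         if flag and i == 0:
--             keep.append(p)
--         else:
--             a = p.find('(')
--             keep.append(p[a:] if a != -1 else '')
--     return ')'.join(keep)
-- ===== Notes on version B (the rewrite author's own statement) =====
-- stated objective: idiomatic
-- what changed: Replaces the char-by-char recursive state machine (which slices the string each call) with a single split(')') / find('(') / join(')') pass: each ')'-separated part keeps its suffix from the first '(' (or is kept whole when the region starts inside), and joining on ')' restores the kept parens.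
import Mathlib
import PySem

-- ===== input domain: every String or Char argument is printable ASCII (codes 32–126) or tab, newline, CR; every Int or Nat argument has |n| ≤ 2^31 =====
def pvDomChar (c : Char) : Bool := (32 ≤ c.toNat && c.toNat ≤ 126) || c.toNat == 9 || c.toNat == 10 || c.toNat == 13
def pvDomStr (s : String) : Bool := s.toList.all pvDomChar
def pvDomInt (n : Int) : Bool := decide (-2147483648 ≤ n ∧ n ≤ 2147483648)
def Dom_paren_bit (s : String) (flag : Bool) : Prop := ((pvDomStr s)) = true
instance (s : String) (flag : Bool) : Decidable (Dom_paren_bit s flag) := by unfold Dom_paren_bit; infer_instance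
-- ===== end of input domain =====

-- B replaces A's char-by-char recursive state machine with one split(')')/find('(')/join(')') pass (idiomatic, same result).

-- ===== PORT A =====
-- A's recursion, char by char over the string with the 'inside' flag
def parenBitGo : List Char → Bool → List Char
  | [], _ => []
  | c :: rest, flag =>
    if c = '(' then c :: parenBitGo rest true
    else if c = ')' then c :: parenBitGo rest false
    else if flag then c :: parenBitGo rest true
    else parenBitGo rest false

def paren_bit (s : String) (flag : Bool) : String :=
  String.mk (parenBitGo s.toList flag)

-- ===== PORT B =====
-- Source B: parts = s.split(')'); keep per part (whole first part if flag, else from first '('); ')'.join(keep)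
def paren_bit_alt (s : String) (flag : Bool) : String :=
  let parts := PySem.Chars.splitOn s.toList [')']
  let keep := (PySem.List.enumerate parts).foldl
    (fun acc ip =>
      acc ++ [if flag && ip.1 == 0 then ip.2
              else
                let a := PySem.Chars.find ip.2 ['(']
                if a != -1 then PySem.Chars.slice ip.2 (some a) none else []]) []
  String.mk (PySem.Chars.join [')'] keep)

-- ===== PRECONDITION & SPEC =====
def Spec_paren_bit (s : String) (flag : Bool) (out : String) : Prop := out = paren_bit_alt s flag
instance (s : String) (flag : Bool) (out : String) : Decidable (Spec_paren_bit s flag out) := by unfold Spec_paren_bit; infer_instance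

-- ===== CLAIM (what is proved, stated in full; the proofs are below) =====
def Claim_equal_paren_bit : Prop := ∀ (s : String) (flag : Bool), Dom_paren_bit s flag → Spec_paren_bit s flag (paren_bit s flag)

-- ===== LEMMAS AND PROOFS =====

-- proof-side view of one part of B: suffix from the first '(' (empty if none)
def partKeep (p : List Char) : List Char :=
  if PySem.Chars.find p ['('] = -1 then [] else p.drop (PySem.Chars.find p ['(']).toNat

-- proof-side structural version of split(')') with the current piece as accumulator
def mySplit (pre : List Char) : List Char → List (List Char)
  | [] => [pre]
  | c :: r => if c = ')' then pre :: mySplit [] r else mySplit (pre ++ [c]) r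

-- B's per-part keep list: head by flag, tail always partKeep
def keepList (flag : Bool) : List (List Char) → List (List Char)
  | [] => []
  | p :: ps => (if flag then p else partKeep p) :: List.map partKeep ps

lemma find_neg_or_nonneg (l : List Char) (sub : List Char) :
    PySem.Chars.find l sub = -1 ∨ 0 ≤ PySem.Chars.find l sub := by
  by_cases h : sub <:+: l
  · exact Or.inr ((PySem.Chars.find_nonneg_iff l sub).mpr h)
  · exact Or.inl ((PySem.Chars.find_eq_neg_one_iff l sub).mpr h)

lemma find_go_shift (l : List Char) (k : Nat) :
    PySem.Chars.find.go ['('] l k =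
      if PySem.Chars.find.go ['('] l 0 = -1 then -1 else PySem.Chars.find.go ['('] l 0 + k := by
  induction l generalizing k with
  | nil => simp [PySem.Chars.find.go]
  | cons c l ih =>
    by_cases hc : c = '('
    · simp [PySem.Chars.find.go, List.isPrefixOf, hc]
    · have hne : ('(' == c) = false := by simp [Ne.symm hc]
      have hstep : ∀ m : Nat, PySem.Chars.find.go ['('] (c :: l) m = PySem.Chars.find.go ['('] l (m + 1) := by
        intro m; simp [PySem.Chars.find.go, List.isPrefixOf, hne]
      rw [hstep k, ih (k + 1), hstep 0, ih 1]
      have hn := find_neg_or_nonneg l ['(']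
      simp only [PySem.Chars.find] at hn
      push_cast
      rcases hn with h | h <;> split_ifs <;> omega

lemma find_cons (c : Char) (l : List Char) :
    PySem.Chars.find (c :: l) ['('] =
      if c = '(' then 0
      else if PySem.Chars.find l ['('] = -1 then -1 else PySem.Chars.find l ['('] + 1 := by
  by_cases hc : c = '('
  · simp [PySem.Chars.find, PySem.Chars.find.go, List.isPrefixOf, hc]
  · have hne : ('(' == c) = false := by simp [Ne.symm hc]
    simp only [PySem.Chars.find, hc, if_false]
    rw [show PySem.Chars.find.go ['('] (c :: l) 0 = PySem.Chars.find.go ['('] l 1 by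
      simp [PySem.Chars.find.go, List.isPrefixOf, hne]]
    rw [find_go_shift l 1]
    norm_num

lemma go_true_no_close {p : List Char} (h : ')' ∉ p) : parenBitGo p true = p := by
  induction p with
  | nil => rfl
  | cons c r ih =>
    have hc : c ≠ ')' := fun hc => h (hc ▸ List.mem_cons_self ..)
    have hr := ih (fun hm => h (List.mem_cons_of_mem _ hm))
    by_cases h1 : c = '('
    · simp [parenBitGo, h1, hr]
    · simp [parenBitGo, h1, hc, hr]

lemma go_false_no_close {p : List Char} (h : ')' ∉ p) : parenBitGo p false = partKeep p := by
  induction p with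
  | nil => simp [parenBitGo, partKeep, PySem.Chars.find, PySem.Chars.find.go]
  | cons c r ih =>
    have hc : c ≠ ')' := fun hc => h (hc ▸ List.mem_cons_self ..)
    have hr := ih (fun hm => h (List.mem_cons_of_mem _ hm))
    by_cases h1 : c = '('
    · subst h1
      have hf : PySem.Chars.find ('(' :: r) ['('] = 0 := by rw [find_cons]; simp
      simp [parenBitGo, partKeep, hf, go_true_no_close (fun hm => h (List.mem_cons_of_mem _ hm))]
    · have hf := find_cons c r
      rw [if_neg h1] at hf
      rcases eq_or_ne (PySem.Chars.find r ['(']) (-1) with h2 | h2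
      · rw [h2, if_pos rfl] at hf
        simp [parenBitGo, h1, hc, hr, partKeep, hf, h2]
      · rw [if_neg h2] at hf
        have hnn : 0 ≤ PySem.Chars.find r ['('] := (find_neg_or_nonneg r ['(']).resolve_left h2
        have hne2 : PySem.Chars.find r ['('] + 1 ≠ -1 := by omega
        have htn : (PySem.Chars.find r ['('] + 1).toNat = (PySem.Chars.find r ['(']).toNat + 1 := by omega
        simp [parenBitGo, h1, hc, hr, partKeep, hf, hne2, h2, htn]

lemma go_append_close (p rest : List Char) (flag : Bool) (h : ')' ∉ p) :
    parenBitGo (p ++ ')' :: rest) flag = parenBitGo p flag ++ ')' :: parenBitGo rest false := by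
  induction p generalizing flag with
  | nil => simp [parenBitGo]
  | cons c r ih =>
    have hc : c ≠ ')' := fun hc => h (hc ▸ List.mem_cons_self ..)
    have hr := fun fl => ih fl (fun hm => h (List.mem_cons_of_mem _ hm))
    by_cases h1 : c = '('
    · simp [parenBitGo, h1, hr true]
    · cases flag with
      | true => simp [parenBitGo, h1, hc, hr true]
      | false => simp [parenBitGo, h1, hc, hr false]

lemma mySplit_ne_nil (pre l) : mySplit pre l ≠ [] := by
  induction l generalizing pre with
  | nil => simp [mySplit]
  | cons c r ih =>
    by_cases hc : c = ')'
    · simp [mySplit, hc]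
    · simp [mySplit, hc]; exact ih _

lemma splitOn_go_eq (fuel : Nat) (l cur : List Char) (acc : List (List Char)) (h : l.length < fuel) :
    PySem.Chars.splitOn.go [')'] fuel l cur acc = acc.reverse ++ mySplit cur.reverse l := by
  induction fuel generalizing l cur acc with
  | zero => omega
  | succ fuel ih =>
    cases l with
    | nil => simp [PySem.Chars.splitOn.go, mySplit]
    | cons c r =>
      by_cases hc : c = ')'
      · have hpre : [')'].isPrefixOf (c :: r) = true := by simp [List.isPrefixOf, hc]
        rw [show PySem.Chars.splitOn.go [')'] (fuel+1) (c :: r) cur acc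
              = PySem.Chars.splitOn.go [')'] fuel (List.drop 1 (c :: r)) [] (cur.reverse :: acc) by
            simp [PySem.Chars.splitOn.go, hpre]]
        simp only [List.drop_succ_cons, List.drop_zero]
        rw [ih r [] (cur.reverse :: acc) (by simpa using Nat.lt_of_succ_lt_succ h)]
        simp [mySplit, hc]
      · have hpre : [')'].isPrefixOf (c :: r) = false := by simp [List.isPrefixOf, Ne.symm hc]
        rw [show PySem.Chars.splitOn.go [')'] (fuel+1) (c :: r) cur acc
              = PySem.Chars.splitOn.go [')'] fuel r (c :: cur) acc by
            simp [PySem.Chars.splitOn.go, hpre]]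
        rw [ih r (c :: cur) acc (by simpa using Nat.lt_of_succ_lt_succ h)]
        simp [mySplit, hc]

lemma splitOn_eq_mySplit (l : List Char) : PySem.Chars.splitOn l [')'] = mySplit [] l := by
  rw [PySem.Chars.splitOn]
  have := splitOn_go_eq (l.length + 1) l [] [] (by omega)
  simpa using this

lemma keepList_false (parts : List (List Char)) : keepList false parts = List.map partKeep parts := by
  cases parts <;> simp [keepList]

lemma main_lemma (l : List Char) : ∀ (pre : List Char) (flag : Bool), ')' ∉ pre →
    parenBitGo (pre ++ l) flag = PySem.Chars.join [')'] (keepList flag (mySplit pre l)) := by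
  induction l with
  | nil =>
    intro pre flag h
    cases flag with
    | true => simp [mySplit, keepList, PySem.Chars.join_singleton, go_true_no_close h]
    | false => simp [mySplit, keepList, PySem.Chars.join_singleton, go_false_no_close h]
  | cons c r ih =>
    intro pre flag h
    by_cases hc : c = ')'
    · subst hc
      rw [go_append_close pre r flag h]
      obtain ⟨q, qs, hq⟩ := List.exists_cons_of_ne_nil (mySplit_ne_nil [] r)
      have hr := ih [] false (by simp)
      rw [List.nil_append] at hr
      have hms : mySplit pre (')' :: r) = pre :: mySplit [] r := by simp [mySplit]
      rw [hms, hq]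
      simp only [keepList, List.map_cons]
      rw [PySem.Chars.join_cons_cons, hr, hq, keepList_false, List.map_cons]
      cases flag <;> simp [go_true_no_close h, go_false_no_close h]
    · have hpre : ')' ∉ pre ++ [c] := by
        intro hm; rcases List.mem_append.mp hm with hm | hm
        · exact h hm
        · simp at hm; exact hc hm.symm
      have := ih (pre ++ [c]) flag hpre
      rw [List.append_assoc, List.singleton_append] at this
      rw [this]
      simp [mySplit, hc]

-- the per-element function of B's fold
def fB (flag : Bool) (ip : Int × List Char) : List Char :=
  if flag && ip.1 == 0 then ip.2
  else
    let a := PySem.Chars.find ip.2 ['(']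
    if a != -1 then PySem.Chars.slice ip.2 (some a) none else []

lemma fB_slice (flag : Bool) (s : Int) (p : List Char) (h : (flag && s == 0) = false) :
    fB flag (s, p) = partKeep p := by
  unfold fB
  simp only [h, Bool.false_eq_true, if_false]
  rcases find_neg_or_nonneg p ['('] with h1 | h1
  · simp [h1, partKeep]
  · have hne : PySem.Chars.find p ['('] ≠ -1 := by omega
    simp [partKeep, PySem.Chars.slice, hne, PySem.List.slice_from p h1]

lemma map_fB_tail (flag : Bool) (ps : List (List Char)) : ∀ s : Int, 1 ≤ s →
    List.map (fB flag) (PySem.List.enumerate ps s) = List.map partKeep ps := by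
  induction ps with
  | nil => intro s _; simp [PySem.List.enumerate]
  | cons q qs ihq =>
    intro s hs
    rw [PySem.List.enumerate_cons, List.map_cons, ihq (s + 1) (by omega)]
    have hz : (flag && s == (0:Int)) = false := by
      have : (s == (0:Int)) = false := by simp; omega
      simp [this]
    rw [fB_slice flag s q hz, List.map_cons]

lemma keep_fold_eq (flag : Bool) (parts : List (List Char)) :
    (PySem.List.enumerate parts).foldl (fun acc ip => acc ++ [fB flag ip]) []
      = keepList flag parts := by
  rw [PySem.List.foldl_append_singleton_eq_map, List.nil_append]
  cases parts with
  | nil => simp [PySem.List.enumerate, keepList]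
  | cons p ps =>
    rw [PySem.List.enumerate_cons, List.map_cons, map_fB_tail flag ps (0 + 1) (by omega)]
    cases flag with
    | false =>
      rw [fB_slice false 0 p (by simp)]
      simp [keepList]
    | true =>
      simp [fB, keepList]

-- ===== VERDICT (by name: the statement is the Claim_ definition above) =====
theorem paren_bit_spec : Claim_equal_paren_bit := by
  intro s flag _
  unfold Spec_paren_bit paren_bit paren_bit_alt
  show String.mk _ = String.mk ((PySem.Chars.join [')']
    ((PySem.List.enumerate (PySem.Chars.splitOn s.toList [')'])).foldl
      (fun acc ip => acc ++ [fB flag ip]) [])))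
  rw [keep_fold_eq flag, splitOn_eq_mySplit]
  have := main_lemma s.toList [] flag (by simp)
  rw [List.nil_append] at this
  rw [this]
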